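-- pv_equiv track=rewrite | github.com/omarstfa/PyFTE | components/modules/faultTreeReconstruction.py | give_names_to_events
-- ===== SOURCE A (Python) =====
-- def give_names_to_events(events):
--     """
--     Give names to the events so they are labeled with a descriptive name instead of a number or a tuple of numbers.
--     The events represented by one number are the basic events.
--     The top event is the event represented by the largest tuple of numbers. Which is also the first event in the list
--     of events. The rest are intermediate events where the event are represented by a tuple of numbers.
--     :param events: List of events
--     :return: List of event names
--     """
--     length = len(events)
--     names = ['NULL'] * length
--
--     # Top Event
--     names[0] = 'Top Event'
--     basic_event_index = 1
--
--     for i in range(1, length):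
--         if len(events[i]) > 1:
--             intermediate_event_name = 'Intermediate Event ' + str(i)
--             names[i] = intermediate_event_name
--         if len(events[i]) == 1:
--             basic_event_name = 'Basic Event ' + str(basic_event_index)
--             names[i] = basic_event_name
--             basic_event_index += 1
--
--     return names
-- ===== SOURCE B (Python) =====
-- def give_names_to_events(events):
--     # Two-pass: precompute the 1-based rank of each basic-event position in a
--     # dict, then build the whole name list in one comprehension.
--     rank = {}
--     for i in range(1, len(events)):
--         if len(events[i]) == 1:
--             rank[i] = len(rank) + 1
--     return ['Top Event' if i == 0
--             else 'Basic Event ' + str(rank[i]) if i in rank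
--             else 'Intermediate Event ' + str(i) if len(e) > 1
--             else 'NULL'
--             for i, e in enumerate(events)]
-- ===== Notes on version B (the rewrite author's own statement) =====
-- stated objective: alternative
-- what changed: Replaces A's single mutating pass with a running basic-event counter by a precomputed rank table for basic-event positions plus a separate comprehension that builds the name list; B returns [] on the empty list where A raises IndexError.
-- outside the precondition, e.g. on give_names_to_events([]): A raises IndexError, B returns []
import Mathlib
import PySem

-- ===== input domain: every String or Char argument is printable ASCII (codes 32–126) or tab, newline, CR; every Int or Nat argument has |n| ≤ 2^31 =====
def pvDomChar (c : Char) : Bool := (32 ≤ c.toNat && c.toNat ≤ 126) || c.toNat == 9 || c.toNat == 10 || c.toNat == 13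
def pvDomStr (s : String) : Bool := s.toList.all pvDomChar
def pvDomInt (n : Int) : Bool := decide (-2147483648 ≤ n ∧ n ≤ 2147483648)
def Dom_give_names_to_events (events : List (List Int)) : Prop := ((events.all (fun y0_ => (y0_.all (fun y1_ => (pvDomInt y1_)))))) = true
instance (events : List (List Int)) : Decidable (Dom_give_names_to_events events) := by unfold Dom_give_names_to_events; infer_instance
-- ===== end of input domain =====

-- B replaces A's single mutating pass with a running counter by a precomputed
-- rank table for basic-event positions plus a separate comprehension (alternative
-- decomposition, same cost); on the empty list A raises IndexError, B returns [].


-- ===== PORT A =====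
def give_names_to_events (events : List (List Int)) : List String :=
  let length : Int := events.length
  let names0 := PySem.List.pyRepeat ["NULL"] length
  -- names[0] = 'Top Event'  (IndexError on the empty list; excluded by Pre_)
  let names1 := PySem.List.pySetD names0 0 "Top Event"
  let st := (PySem.List.pyRange 1 length 1).foldl
    (fun (st : List String × Int) i =>
      let names := if 1 < (PySem.List.pyGetD events i []).length
        then PySem.List.pySetD st.1 i ("Intermediate Event " ++ PySem.Int.toStr i)
        else st.1
      if (PySem.List.pyGetD events i []).length = 1
        then (PySem.List.pySetD names i ("Basic Event " ++ PySem.Int.toStr st.2), st.2 + 1)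
        else (names, st.2))
    (names1, 1)
  st.1

-- ===== PORT B =====
def give_names_to_events_alt (events : List (List Int)) : List String :=
  let rank : PySem.Dict Int Int := (PySem.List.pyRange 1 events.length 1).foldl
    (fun d i => if (PySem.List.pyGetD events i []).length = 1
      then d.insert i ((d.size : Int) + 1) else d)
    PySem.Dict.empty
  (PySem.List.enumerate events).map (fun (p : Int × List Int) =>
    if p.1 = 0 then "Top Event"
    else match rank.get? p.1 with
      | some r => "Basic Event " ++ PySem.Int.toStr r
      | none => if 1 < p.2.length then "Intermediate Event " ++ PySem.Int.toStr p.1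
                else "NULL")

-- ===== PRECONDITION & SPEC =====
-- Pre_ excludes only the empty list, on which A raises IndexError (names[0] = …).
def Pre_give_names_to_events (events : List (List Int)) : Prop := events ≠ []
instance (events : List (List Int)) : Decidable (Pre_give_names_to_events events) := by unfold Pre_give_names_to_events; infer_instance
def pvWitness_give_names_to_events : List (List Int) := [[1, 2], [1], [3]]

def Spec_give_names_to_events (events : List (List Int)) (out : List String) : Prop := out = give_names_to_events_alt events
instance (events : List (List Int)) (out : List String) : Decidable (Spec_give_names_to_events events out) := by unfold Spec_give_names_to_events; infer_instance

-- ===== CLAIM (what is proved, stated in full; the proofs are below) =====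
def Claim_equal_give_names_to_events : Prop := ∀ (events : List (List Int)), Dom_give_names_to_events events → Pre_give_names_to_events events → Spec_give_names_to_events events (give_names_to_events events)

-- ===== LEMMAS AND PROOFS =====

-- number of basic-event positions among indices 1 ≤ j < m
def pvCnt (events : List (List Int)) : Nat → Nat
  | 0 => 0
  | m + 1 => pvCnt events m + (if 1 ≤ m ∧ (events.getD m []).length = 1 then 1 else 0)

-- the final label of position j
def pvLabel (events : List (List Int)) (j : Nat) : String :=
  if j = 0 then "Top Event"
  else if (events.getD j []).length = 1 then
    "Basic Event " ++ PySem.Int.toStr (1 + (pvCnt events j : Int))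
  else if 1 < (events.getD j []).length then
    "Intermediate Event " ++ PySem.Int.toStr (j : Int)
  else "NULL"

-- the name list after A has processed indices 1 ≤ j < m
def pvUpto (events : List (List Int)) (m j : Nat) : String :=
  if j < m then pvLabel events j else "NULL"

lemma pvMapRangeSet (n m : Nat) (f : Nat → String) (v : String) :
    ((List.range n).map f).set m v
      = (List.range n).map (fun j => if j = m then v else f j) := by
  apply List.ext_getElem <;> simp
  intro i hi
  rw [List.getElem_set]
  by_cases him : i = m <;> simp [him]
  exact fun hmi => absurd hmi.symm him

-- A's name list just before the loop is map (pvUpto · 1)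
lemma pvInit (events : List (List Int)) :
    (List.replicate events.length "NULL").set 0 "Top Event"
      = (List.range events.length).map (pvUpto events 1) := by
  apply List.ext_getElem <;> simp
  intro i hi
  rw [List.getElem_set]
  by_cases hi0 : i = 0 <;> simp [hi0, pvUpto, pvLabel]
  exact fun h0 => absurd h0.symm hi0

-- A's loop body, named for the proofs (definitionally the lambda in the port)
def pvStep (events : List (List Int)) (st : List String × Int) (i : Int) : List String × Int :=
  let names := if 1 < (PySem.List.pyGetD events i []).length
    then PySem.List.pySetD st.1 i ("Intermediate Event " ++ PySem.Int.toStr i)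
    else st.1
  if (PySem.List.pyGetD events i []).length = 1
    then (PySem.List.pySetD names i ("Basic Event " ++ PySem.Int.toStr st.2), st.2 + 1)
    else (names, st.2)

-- invariant of A's loop: after processing indices 1..m-1 the names are labelled
-- up to m and the counter is 1 + (number of basic events seen)
lemma pvALoop (events : List (List Int)) (m : Nat) (h1 : 1 ≤ m) (hn : m ≤ events.length) :
    (PySem.List.pyRange 1 (m : Int) 1).foldl (pvStep events)
        ((List.range events.length).map (pvUpto events 1), 1)
      = ((List.range events.length).map (pvUpto events m), 1 + (pvCnt events m : Int)) := by
  induction m with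
  | zero => omega
  | succ m ih =>
    by_cases hm : m = 0
    · subst hm
      rw [show ((1:Nat):Int) = 1 by norm_num, PySem.List.pyRange_one_eq_nil (by omega)]
      simp [pvCnt]
    · have h1m : 1 ≤ m := by omega
      have hrange : PySem.List.pyRange 1 ((m+1 : Nat) : Int) 1
          = PySem.List.pyRange 1 (m : Int) 1 ++ [(m : Int)] := by
        push_cast
        exact PySem.List.pyRange_one_succ_right (by exact_mod_cast h1m)
      rw [hrange, List.foldl_append, ih h1m (by omega)]
      simp only [List.foldl_cons, List.foldl_nil]
      unfold pvStep
      simp only [PySem.List.pyGetD_natCast, PySem.List.pySetD_natCast]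
      by_cases hb : (events.getD m []).length = 1
      · simp only [hb, if_pos, if_neg (by omega : ¬ 1 < (1:Nat))]
        rw [List.getD_eq_getElem?_getD] at hb
        refine Prod.ext ?_ ?_
        · rw [pvMapRangeSet]
          apply List.map_congr_left
          intro j hj
          by_cases hjm : j = m
          · subst hjm
            simp [pvUpto, pvLabel, hm, hb]
          · simp [hjm, pvUpto, show j < m + 1 ↔ j < m by omega]
        · simp [pvCnt, h1m, hb]
          omega
      · by_cases hi : 1 < (events.getD m []).length
        · simp only [hi, if_pos, if_neg hb]
          rw [List.getD_eq_getElem?_getD] at hb hi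
          refine Prod.ext ?_ ?_
          · rw [pvMapRangeSet]
            apply List.map_congr_left
            intro j hj
            by_cases hjm : j = m
            · subst hjm
              simp [pvUpto, pvLabel, hm, hb, hi]
            · simp [hjm, pvUpto, show j < m + 1 ↔ j < m by omega]
          · simp [pvCnt, hb]
        · simp only [if_neg hi, if_neg hb]
          rw [List.getD_eq_getElem?_getD] at hb hi
          refine Prod.ext ?_ ?_
          · apply List.map_congr_left
            intro j hj
            by_cases hjm : j = m
            · subst hjm
              simp [pvUpto, pvLabel, hm, hb, hi]
            · simp [pvUpto, show j < m + 1 ↔ j < m by omega]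
          · simp [pvCnt, hb]

lemma pvA_eq (events : List (List Int)) (h : events ≠ []) :
    give_names_to_events events = (List.range events.length).map (pvLabel events) := by
  have hn : 1 ≤ events.length := List.length_pos_of_ne_nil h
  have h0 : give_names_to_events events
      = ((PySem.List.pyRange 1 (events.length : Int) 1).foldl (pvStep events)
          (PySem.List.pySetD (PySem.List.pyRepeat ["NULL"] (events.length : Int)) 0 "Top Event", 1)).1 := rfl
  rw [h0]
  have hrep : PySem.List.pyRepeat ["NULL"] ((events.length : Int))
      = List.replicate events.length "NULL" := by
    rw [PySem.List.pyRepeat_singleton]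
    norm_num
  have hset : PySem.List.pySetD (List.replicate events.length "NULL") (0:Int) "Top Event"
      = (List.replicate events.length "NULL").set 0 "Top Event" := by
    rw [show ((0:Int)) = ((0:Nat):Int) from rfl, PySem.List.pySetD_natCast]
  rw [hrep, hset, pvInit, pvALoop events events.length hn le_rfl]
  apply List.map_congr_left
  intro j hj
  simp [pvUpto, List.mem_range.mp hj]

-- inserting a fresh key grows a dict by one entry
lemma pvSizeInsertNew (d : PySem.Dict Int Int) (k v : Int) (h : d.get? k = none) :
    (d.insert k v).size = d.size + 1 := by
  simp [PySem.Dict.insert, PySem.Dict.size, PySem.Dict.get?, PySem.Dict.contains] at *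
  rw [if_neg]
  · simp
  · simp
    exact fun a hab => h k a hab rfl

-- B's first loop body, named for the proofs (definitionally the lambda in the port)
def pvRStep (events : List (List Int)) (d : PySem.Dict Int Int) (i : Int) : PySem.Dict Int Int :=
  if (PySem.List.pyGetD events i []).length = 1 then d.insert i ((d.size : Int) + 1) else d

-- invariant of B's rank-building loop: size = number of basic events seen,
-- and each basic position 1 ≤ j < m is mapped to its 1-based rank
lemma pvRank (events : List (List Int)) (m : Nat) (hm : m ≤ events.length) :
    ((PySem.List.pyRange 1 (m : Int) 1).foldl (pvRStep events) PySem.Dict.empty).size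
        = pvCnt events m
      ∧ ∀ j : Nat,
        ((PySem.List.pyRange 1 (m : Int) 1).foldl (pvRStep events) PySem.Dict.empty).get? (j : Int)
          = if 1 ≤ j ∧ j < m ∧ (events.getD j []).length = 1
            then some ((pvCnt events j : Int) + 1) else none := by
  induction m with
  | zero =>
    rw [show ((0:Nat):Int) = 0 from rfl, PySem.List.pyRange_one_eq_nil (by omega)]
    constructor
    · simp [pvCnt, PySem.Dict.empty, PySem.Dict.size]
    · intro j
      simp [PySem.Dict.empty, PySem.Dict.get?]
  | succ m ih =>
    by_cases hm0 : m = 0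
    · subst hm0
      rw [show ((1:Nat):Int) = 1 by norm_num, PySem.List.pyRange_one_eq_nil (by omega)]
      constructor
      · simp [pvCnt, PySem.Dict.empty, PySem.Dict.size]
      · intro j
        simp [PySem.Dict.empty, PySem.Dict.get?]
        omega
    · have h1m : 1 ≤ m := by omega
      obtain ⟨ihs, ihg⟩ := ih (by omega)
      have hrange : PySem.List.pyRange 1 ((m+1 : Nat) : Int) 1
          = PySem.List.pyRange 1 (m : Int) 1 ++ [(m : Int)] := by
        push_cast
        exact PySem.List.pyRange_one_succ_right (by exact_mod_cast h1m)
      rw [hrange, List.foldl_append]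
      simp only [List.foldl_cons, List.foldl_nil]
      set d := (PySem.List.pyRange 1 (m : Int) 1).foldl (pvRStep events) PySem.Dict.empty
      unfold pvRStep
      simp only [PySem.List.pyGetD_natCast]
      have hnone : d.get? (m : Int) = none := by
        rw [ihg m]
        simp
      by_cases hb : (events.getD m []).length = 1
      · simp only [hb, if_pos]
        rw [List.getD_eq_getElem?_getD] at hb
        constructor
        · rw [pvSizeInsertNew d _ _ hnone, ihs]
          simp [pvCnt, h1m, hb]
        · intro j
          by_cases hjm : j = m
          · subst hjm
            rw [PySem.Dict.get?_insert_self, ihs]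
            simp [h1m, hb]
          · rw [PySem.Dict.get?_insert_of_ne d _ (by exact_mod_cast hjm), ihg j]
            have : (1 ≤ j ∧ j < m ∧ (events.getD j []).length = 1)
                ↔ (1 ≤ j ∧ j < m + 1 ∧ (events.getD j []).length = 1) := by
              constructor <;> rintro ⟨a, b, c⟩ <;> exact ⟨a, by omega, c⟩
            rw [if_congr this rfl rfl]
      · simp only [hb, if_false]
        rw [List.getD_eq_getElem?_getD] at hb
        constructor
        · rw [ihs]
          simp [pvCnt, hb]
        · intro j
          rw [ihg j]
          by_cases hjm : j = m
          · subst hjm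
            simp [hb]
          · have : (1 ≤ j ∧ j < m ∧ (events.getD j []).length = 1)
                ↔ (1 ≤ j ∧ j < m + 1 ∧ (events.getD j []).length = 1) := by
              constructor <;> rintro ⟨a, b, c⟩
              · exact ⟨a, by omega, c⟩
              · exact ⟨a, by omega, c⟩
            rw [if_congr this rfl rfl]

-- B's labelling function, named for the proofs (definitionally the lambda in the port)
def pvF (rank : PySem.Dict Int Int) (p : Int × List Int) : String :=
  if p.1 = 0 then "Top Event"
  else match rank.get? p.1 with
    | some r => "Basic Event " ++ PySem.Int.toStr r
    | none => if 1 < p.2.length then "Intermediate Event " ++ PySem.Int.toStr p.1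
              else "NULL"

lemma pvB_eq (events : List (List Int)) :
    give_names_to_events_alt events = (List.range events.length).map (pvLabel events) := by
  have h0 : give_names_to_events_alt events
      = (PySem.List.enumerate events).map
          (pvF ((PySem.List.pyRange 1 (events.length : Int) 1).foldl (pvRStep events)
            PySem.Dict.empty)) := rfl
  rw [h0, PySem.List.enumerate_eq_map_pyRange events ([] : List Int)]
  have hlen : PySem.List.len events = (events.length : Int) := by
    simp [PySem.List.len_eq]
  rw [hlen, PySem.List.pyRange_zero_nat, List.map_map, List.map_map]
  apply List.map_congr_left
  intro j hj
  have hjn : j < events.length := List.mem_range.mp hj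
  simp only [Function.comp_apply]
  unfold pvF
  simp only [PySem.List.pyGetD_natCast]
  by_cases hj0 : j = 0
  · subst hj0
    simp [pvLabel]
  · rw [if_neg (by exact_mod_cast hj0)]
    rw [(pvRank events events.length le_rfl).2 j]
    by_cases hb : (events.getD j []).length = 1
    · rw [if_pos ⟨by omega, hjn, hb⟩]
      rw [List.getD_eq_getElem?_getD] at hb
      simp [pvLabel, hj0, hb, Int.add_comm]
    · rw [if_neg (by tauto)]
      rw [List.getD_eq_getElem?_getD] at hb
      simp [pvLabel, hj0, hb]

-- ===== VERDICT (by name: the statement is the Claim_ definition above) =====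
theorem give_names_to_events_spec : Claim_equal_give_names_to_events := by
  intro events _ hpre
  unfold Spec_give_names_to_events
  rw [pvA_eq events hpre, pvB_eq events]
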